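-- pv_equiv track=rewrite | github.com/Alexcuellar18/user-log-in | main.py | validcredentials
-- ===== SOURCE A (Python) =====
-- def validcredentials(user_entry):
--   if len(user_entry) < 3 or len(user_entry) > 20:
--     return False
--
--   for i in user_entry:
--     if i == ' ':
--       return False
--     else:
--       return True
-- ===== SOURCE B (Python) =====
-- def validcredentials(user_entry):
--   trimmed = user_entry.lstrip(' ')
--   return 3 <= len(user_entry) <= 20 and len(trimmed) == len(user_entry)
-- ===== Notes on version B (the rewrite author's own statement) =====
-- stated objective: alternative
-- what changed: Instead of iterating over characters and returning on the first one, B normalizes the string by stripping leading spaces and accepts iff the length is in [3,20] and stripping removed nothing, which coincides with A's first-character-only space test.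
import Mathlib
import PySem

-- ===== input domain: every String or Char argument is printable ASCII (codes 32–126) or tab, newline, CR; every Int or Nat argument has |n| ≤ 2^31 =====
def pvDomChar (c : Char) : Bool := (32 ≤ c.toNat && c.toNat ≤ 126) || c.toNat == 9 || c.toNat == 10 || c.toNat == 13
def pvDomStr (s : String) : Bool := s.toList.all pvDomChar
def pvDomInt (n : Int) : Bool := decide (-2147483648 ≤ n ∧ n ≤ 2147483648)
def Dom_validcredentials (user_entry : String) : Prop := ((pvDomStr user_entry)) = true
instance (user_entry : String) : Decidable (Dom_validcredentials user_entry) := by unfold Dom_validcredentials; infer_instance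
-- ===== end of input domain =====

-- B normalizes by stripping leading spaces and compares lengths instead of looping over characters (objective: alternative).

-- ===== PORT A =====
-- the for-loop of A: returns False/True on the first character; the [] case (Python would
-- fall off the loop and return None) is unreachable because the length guard ensures len ≥ 3
def validcredentialsLoop : List Char → Bool
  | [] => false
  | c :: _ => if c == ' ' then false else true

def validcredentials (user_entry : String) : Bool :=
  if user_entry.toList.length < 3 ∨ user_entry.toList.length > 20 then false
  else validcredentialsLoop user_entry.toList

-- ===== PORT B =====
-- List.dropWhile (· == ' ') is an exact port of Python's str.lstrip(' ') on code points
def validcredentials_alt (user_entry : String) : Bool :=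
  let trimmed := user_entry.toList.dropWhile (· == ' ')
  decide (3 ≤ user_entry.toList.length ∧ user_entry.toList.length ≤ 20)
    && (trimmed.length == user_entry.toList.length)

-- ===== PRECONDITION & SPEC =====
def Spec_validcredentials (user_entry : String) (out : Bool) : Prop := out = validcredentials_alt user_entry
instance (user_entry : String) (out : Bool) : Decidable (Spec_validcredentials user_entry out) := by unfold Spec_validcredentials; infer_instance

-- ===== CLAIM (what is proved, stated in full; the proofs are below) =====
def Claim_equal_validcredentials : Prop := ∀ (user_entry : String), Dom_validcredentials user_entry → Spec_validcredentials user_entry (validcredentials user_entry)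

-- ===== LEMMAS AND PROOFS =====

-- ===== VERDICT (by name: the statement is the Claim_ definition above) =====
theorem validcredentials_spec : Claim_equal_validcredentials := by
  intro s _
  unfold Spec_validcredentials validcredentials validcredentials_alt validcredentialsLoop
  rcases h : s.toList with _ | ⟨c, rest⟩
  · simp
  · by_cases hc : c = ' '
    · have hle := List.length_dropWhile_le (fun x => x == ' ') rest
      have hb : (c == ' ') = true := beq_iff_eq.mpr hc
      by_cases h3 : rest.length + 1 < 3 <;> by_cases h20 : rest.length + 1 > 20 <;>
        simp [hb, h3, h20, List.dropWhile] <;> omega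
    · have hb : (c == ' ') = false := beq_eq_false_iff_ne.mpr hc
      by_cases h3 : rest.length + 1 < 3 <;> by_cases h20 : rest.length + 1 > 20 <;>
        simp [hb, h3, h20, List.dropWhile] <;> omega
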